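-- pv_equiv track=rewrite | github.com/UberM1/bingo | src/bingo.py | mayores_a_la_derecha
-- ===== SOURCE A (Python) =====
-- def mayores_a_la_derecha(mi_carton):
--     for fila in range(3):
--         for columna in range(9):
--             if mi_carton[fila][columna] != 0:
--                 for i in range(columna + 1, 9):
--                     if mi_carton[0][i] != 0:
--                         if mi_carton[0][i] < mi_carton[fila][columna]:
--                             return False
--                     if mi_carton[1][i] != 0:
--                         if mi_carton[1][i] < mi_carton[fila][columna]:
--                             return False
--                     if mi_carton[2][i] != 0:
--                         if mi_carton[2][i] < mi_carton[fila][columna]: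
--                             return False
--     return True
-- ===== SOURCE B (Python) =====
-- def mayores_a_la_derecha(mi_carton):
--     prefix_max = None
--     for columna in range(9):
--         vals = [fila[columna] for fila in mi_carton[:3] if fila[columna] != 0]
--         if prefix_max is not None and any(v < prefix_max for v in vals):
--             return False
--         for v in vals:
--             if prefix_max is None or v > prefix_max:
--                 prefix_max = v
--     return True
-- ===== Notes on version B (the rewrite author's own statement) =====
-- stated objective: simpler
-- what changed: Replaces A's triple nested scan (for every nonzero cell, rescan all three rows of every column to its right) by one left-to-right pass over the 9 columns that keeps a running maximum of the nonzero values seen so far and fails as soon as a column holds a smaller nonzero value.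
-- outside the precondition, e.g. on mayores_a_la_derecha([[5, 0, 1], [0, 9], [0, 0, 0]]): A returns False, B raises IndexError
import Mathlib
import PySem

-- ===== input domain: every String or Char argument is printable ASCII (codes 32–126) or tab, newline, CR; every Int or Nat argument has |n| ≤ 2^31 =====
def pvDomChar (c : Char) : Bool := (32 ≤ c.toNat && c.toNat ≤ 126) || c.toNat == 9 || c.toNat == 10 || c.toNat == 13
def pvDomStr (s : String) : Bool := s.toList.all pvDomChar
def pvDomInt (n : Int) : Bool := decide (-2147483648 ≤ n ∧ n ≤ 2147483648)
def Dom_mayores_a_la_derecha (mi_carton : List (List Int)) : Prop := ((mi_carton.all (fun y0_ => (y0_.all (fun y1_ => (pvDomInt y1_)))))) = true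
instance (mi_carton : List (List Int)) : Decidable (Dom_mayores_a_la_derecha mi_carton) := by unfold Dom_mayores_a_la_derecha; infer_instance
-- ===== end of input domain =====

-- B replaces A's triple nested scan by one left-to-right pass over the 9 columns keeping a
-- running maximum of the nonzero values seen so far (objective: simpler).


-- ===== PORT A =====
-- mi_carton[f][i]; in range under Pre_, so the `getD` defaults are never taken there
def pvCell (c : List (List Int)) (f i : Int) : Int :=
  (PySem.List.pyGet? ((PySem.List.pyGet? c f).getD []) i).getD 0

def mayores_a_la_derecha (mi_carton : List (List Int)) : Bool :=
  -- 'return False' inside the triple loop = one big any; final 'return True' = its negation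
  !((PySem.List.pyRange 0 3 1).any (fun fila =>
      (PySem.List.pyRange 0 9 1).any (fun columna =>
        (pvCell mi_carton fila columna != 0) &&
        (PySem.List.pyRange (columna + 1) 9 1).any (fun i =>
          ((pvCell mi_carton 0 i != 0) && decide (pvCell mi_carton 0 i < pvCell mi_carton fila columna)) ||
          ((pvCell mi_carton 1 i != 0) && decide (pvCell mi_carton 1 i < pvCell mi_carton fila columna)) ||
          ((pvCell mi_carton 2 i != 0) && decide (pvCell mi_carton 2 i < pvCell mi_carton fila columna))))))

-- ===== PORT B =====
-- the nonzero values of column `col` among the first three rows (Source B's list comprehension);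
-- a missing cell defaults to 0 here, which the ≠ 0 filter drops (the cell exists under Pre_)
def pvNz (c : List (List Int)) (col : Int) : List Int :=
  (PySem.List.slice c none (some 3)).filterMap (fun fila =>
    if (PySem.List.pyGet? fila col).getD 0 ≠ 0
      then some ((PySem.List.pyGet? fila col).getD 0) else none)

-- the prefix_max update loop of Source B
def pvUpd (pm : Option Int) (vals : List Int) : Option Int :=
  vals.foldl (fun acc v =>
    match acc with
    | none => some v
    | some m => if v > m then some v else acc) pm

def pvGoB (c : List (List Int)) : List Int → Option Int → Bool
  | [], _ => true
  | col :: rest, pm =>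
    let vals := pvNz c col
    if (match pm with
        | some m => vals.any (fun v => decide (v < m))
        | none => false) then false
    else pvGoB c rest (pvUpd pm vals)

def mayores_a_la_derecha_alt (mi_carton : List (List Int)) : Bool :=
  pvGoB mi_carton (PySem.List.pyRange 0 9 1) none

-- ===== PRECONDITION & SPEC =====
-- cell (f, i) exists on the card
def pvShapeB (c : List (List Int)) (f i : Nat) : Bool :=
  decide (f < c.length) && decide (i < (c.getD f []).length)

-- Boolean form of the precondition (finite bounded quantifiers, so that it is decidable)
def pvPreB (c : List (List Int)) : Bool :=
  (decide (3 <= c.length) && (List.range 3).all fun f => decide (9 <= (c.getD f []).length)) ||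
  ((List.range 3).any fun f1 => (List.range 9).any fun col =>
   (List.range 3).any fun f2 => (List.range 9).any fun i =>
    decide (col < i) && pvShapeB c f1 col && pvShapeB c f2 i &&
    (pvCell c f1 col != 0) && (pvCell c f2 i != 0) &&
    decide (pvCell c f2 i < pvCell c f1 col) &&
    -- every anchor cell A reads up to (f1, col) exists
    ((List.range (f1+1)).all fun f => (List.range 9).all fun c' =>
      !(decide (f < f1) || decide (c' <= col)) || pvShapeB c f c') &&
    -- every cell read while scanning to the right of an earlier nonzero anchor exists
    ((List.range (f1+1)).all fun f => (List.range 9).all fun c' =>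
      !((decide (f < f1) || decide (c' < col)) && (pvCell c f c' != 0)) ||
      ((List.range 9).all fun i' => !decide (c' < i') ||
        ((List.range 3).all fun f' => pvShapeB c f' i'))) &&
    -- every cell read while scanning from col+1 up to the violating cell (f2, i) exists
    ((List.range 9).all fun i' => !(decide (col < i') && decide (i' < i)) ||
      ((List.range 3).all fun f' => pvShapeB c f' i')) &&
    ((List.range 3).all fun f' => !decide (f' < f2) || pvShapeB c f' i))

-- Boolean form of "Python B returns": every sliced row reaches column 9, or B's left-to-right
-- column pass meets a violating column before its first out-of-range read
def pvPreBB (c : List (List Int)) : Bool :=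
  ((List.range (min 3 c.length)).all fun f => decide (9 ≤ (c.getD f []).length)) ||
  ((List.range 9).any fun i =>
    ((List.range (min 3 c.length)).all fun f =>
      (List.range (i+1)).all fun j => pvShapeB c f j) &&
    ((List.range (min 3 c.length)).any fun f2 =>
      (List.range (min 3 c.length)).any fun f1 =>
        (List.range i).any fun cc =>
          (pvCell c f2 i != 0) && (pvCell c f1 cc != 0) &&
          decide (pvCell c f2 i < pvCell c f1 cc)))

-- Pre_ = "Python A returns" AND "Python B returns". pvPreB: either the card has a full 3x9
-- prefix, or a violating pair of nonzero cells is reached in A's row-major scan before any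
-- out-of-range read. Outside pvPreB, A raises IndexError. The pvPreBB conjunct additionally
-- excludes the ragged cards on which A happens to return False just before its first
-- out-of-range read while B's column-major pass reads a missing cell first and raises there.
def Pre_mayores_a_la_derecha (mi_carton : List (List Int)) : Prop :=
  (pvPreB mi_carton && pvPreBB mi_carton) = true
instance (mi_carton : List (List Int)) : Decidable (Pre_mayores_a_la_derecha mi_carton) := by unfold Pre_mayores_a_la_derecha; infer_instance

def pvWitness_mayores_a_la_derecha : List (List Int) :=
  [[1,0,0,20,0,0,61,0,80],[0,11,0,0,45,0,0,71,0],[3,0,25,0,0,52,0,0,90]]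

def Spec_mayores_a_la_derecha (mi_carton : List (List Int)) (out : Bool) : Prop := out = mayores_a_la_derecha_alt mi_carton
instance (mi_carton : List (List Int)) (out : Bool) : Decidable (Spec_mayores_a_la_derecha mi_carton out) := by unfold Spec_mayores_a_la_derecha; infer_instance

-- ===== CLAIM (what is proved, stated in full; the proofs are below) =====
def Claim_equal_mayores_a_la_derecha : Prop := ∀ (mi_carton : List (List Int)), Dom_mayores_a_la_derecha mi_carton → Pre_mayores_a_la_derecha mi_carton → Spec_mayores_a_la_derecha mi_carton (mayores_a_la_derecha mi_carton)

-- ===== LEMMAS AND PROOFS =====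

-- the common mathematical reading of both programs: nonzero values never decrease across columns
def pvOrdered (c : List (List Int)) : Prop :=
  ∀ c1 c2 : Int, 0 ≤ c1 → c1 < c2 → c2 < 9 →
    ∀ v ∈ pvNz c c1, ∀ w ∈ pvNz c c2, v ≤ w

def pvPmLe (pm : Option Int) (w : Int) : Prop := ∀ m, pm = some m → m ≤ w

lemma pvMem_nz {c : List (List Int)} {col v : Int} (hcol : 0 ≤ col) :
    v ∈ pvNz c col ↔ ∃ f, (0 ≤ f ∧ f < 3) ∧ pvCell c f col ≠ 0 ∧ pvCell c f col = v := by
  simp only [pvNz, List.mem_filterMap, PySem.List.slice_to c (by omega : (0:Int) ≤ 3),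
    List.mem_take_iff_getElem]
  constructor
  · rintro ⟨row, ⟨n, hn, hrow⟩, hsome⟩
    split_ifs at hsome with hg
    · cases hsome
      refine ⟨(n : Int), ⟨by omega, by omega⟩, ?_, ?_⟩
      · show pvCell c (n : Int) col ≠ 0
        simpa [pvCell, PySem.List.pyGet?_natCast, hrow, List.getElem?_eq_getElem (by omega : n < c.length)]
          using hg
      · show pvCell c (n : Int) col = _
        simp [pvCell, PySem.List.pyGet?_natCast, hrow, List.getElem?_eq_getElem (by omega : n < c.length)]
  · rintro ⟨f, ⟨hf0, hf3⟩, hne, hv⟩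
    have hflen : f < (c.length : Int) := by
      by_contra hle
      rw [not_lt] at hle
      apply hne
      have hnone : PySem.List.pyGet? c f = none := by
        rw [PySem.List.pyGet?_of_nonneg c hf0]
        exact List.getElem?_eq_none (by omega)
      simp [pvCell, hnone, PySem.List.pyGet?_of_nonneg _ hcol]
    have hfn : f.toNat < c.length := by omega
    have hq : ∃ row, getElem? c f.toNat = some row := by
      rw [List.getElem?_eq_getElem hfn]
      exact ⟨_, rfl⟩
    obtain ⟨row, hq⟩ := hq
    have hrow : getElem c f.toNat hfn = row := by
      rw [List.getElem?_eq_getElem hfn] at hq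
      exact Option.some.inj hq
    refine ⟨row, ⟨f.toNat, by omega, hrow⟩, ?_⟩
    have hcell : (PySem.List.pyGet? row col).getD 0 = pvCell c f col := by
      simp only [pvCell, PySem.List.pyGet?_of_nonneg c hf0, List.getElem?_eq_getElem hfn,
        Option.getD_some, hrow]
    rw [hcell, if_pos hne]
    exact congrArg some hv

lemma pvPmLe_step (pm : Option Int) (v w : Int) :
    pvPmLe (match pm with | none => some v | some m => if v > m then some v else pm) w
      ↔ pvPmLe pm w ∧ v ≤ w := by
  cases pm with
  | none => simp [pvPmLe]
  | some m =>
    by_cases h : v > m <;> simp [h, pvPmLe] <;> omega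

lemma pvPmLe_upd (vals : List Int) (pm : Option Int) (w : Int) :
    pvPmLe (pvUpd pm vals) w ↔ pvPmLe pm w ∧ ∀ v ∈ vals, v ≤ w := by
  induction vals generalizing pm with
  | nil => simp [pvUpd]
  | cons v vs ih =>
    have step : pvUpd pm (v :: vs) =
        pvUpd (match pm with | none => some v | some m => if v > m then some v else pm) vs := by
      cases pm <;> simp [pvUpd]
    rw [step, ih, pvPmLe_step]
    simp only [List.mem_cons]
    constructor
    · rintro ⟨⟨h1, h2⟩, h3⟩
      exact ⟨h1, fun x hx => by rcases hx with rfl | hx; exact h2; exact h3 x hx⟩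
    · rintro ⟨h1, h2⟩
      exact ⟨⟨h1, h2 v (Or.inl rfl)⟩, fun x hx => h2 x (Or.inr hx)⟩

lemma pvViol_eq_false {vals : List Int} {pm : Option Int} :
    ((match pm with
      | some m => vals.any (fun v => decide (v < m))
      | none => false) = false) ↔ ∀ v ∈ vals, pvPmLe pm v := by
  cases pm with
  | none => simp [pvPmLe]
  | some m =>
    simp only [List.any_eq_false, decide_eq_true_eq, pvPmLe]
    constructor
    · intro h v hv m' hm'
      have := h v hv
      cases hm'; omega
    · intro h v hv
      have := h v hv m rfl; omega

-- loop invariant for B's pass, counting down from the right end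
lemma pvGoB_iff (c : List (List Int)) :
    ∀ (n : Nat) (pm : Option Int), n ≤ 9 →
      (pvGoB c (PySem.List.pyRange ((9:Int) - n) 9 1) pm = true ↔
        ((∀ c1 c2 : Int, (9:Int) - n ≤ c1 → c1 < c2 → c2 < 9 →
            ∀ v ∈ pvNz c c1, ∀ w ∈ pvNz c c2, v ≤ w) ∧
         (∀ c2 : Int, (9:Int) - n ≤ c2 → c2 < 9 → ∀ w ∈ pvNz c c2, pvPmLe pm w))) := by
  intro n
  induction n with
  | zero =>
    intro pm _
    rw [PySem.List.pyRange_one_eq_nil (by omega)]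
    constructor
    · intro _
      exact ⟨fun c1 c2 h1 h2 h3 => by omega, fun c2 h1 h2 => by omega⟩
    · intro _; rfl
  | succ k ih =>
    intro pm hk
    set j : Int := (9:Int) - (k+1 : Nat) with hj
    have hj9 : j < 9 := by omega
    have hjk : j + 1 = (9:Int) - (k : Nat) := by omega
    rw [PySem.List.pyRange_one_cons hj9]
    show (pvGoB c (j :: PySem.List.pyRange (j+1) 9 1) pm = true) ↔ _
    have hexp : pvGoB c (j :: PySem.List.pyRange (j+1) 9 1) pm =
        if (match pm with
            | some m => (pvNz c j).any (fun v => decide (v < m))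
            | none => false) then false
        else pvGoB c (PySem.List.pyRange (j+1) 9 1) (pvUpd pm (pvNz c j)) := by
      simp [pvGoB]
    rw [hexp]
    have hsplit := @pvViol_eq_false (pvNz c j) pm
    generalize hV : (match pm with
        | some m => (pvNz c j).any (fun v => decide (v < m))
        | none => false) = V at hsplit ⊢
    cases V with
    | true =>
      -- violation found at column j: both sides false
      rw [if_pos rfl]
      simp only [Bool.false_eq_true, false_iff]
      rintro ⟨_, hbel⟩
      have hall : ∀ v ∈ pvNz c j, pvPmLe pm v := hbel j (by omega) hj9
      exact Bool.noConfusion (hsplit.mpr hall)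
    | false =>
      rw [if_neg (by exact Bool.false_ne_true)]
      have hnov : ∀ v ∈ pvNz c j, pvPmLe pm v := hsplit.mp rfl
      rw [hjk] at *
      rw [ih (pvUpd pm (pvNz c j)) (by omega)]
      constructor
      · rintro ⟨hpairs, hbel⟩
        constructor
        · -- pairs from j
          intro c1 c2 h1 h2 h3 v hvmem w hw
          by_cases hc1 : c1 = j
          · subst hc1
            have := hbel c2 (by omega) h3 w hw
            exact ((pvPmLe_upd _ _ _).mp this).2 v hvmem
          · exact hpairs c1 c2 (by omega) h2 h3 v hvmem w hw
        · -- below pm from j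
          intro c2 h1 h2 w hw
          by_cases hc2 : c2 = j
          · subst hc2; exact hnov w hw
          · have := hbel c2 (by omega) h2 w hw
            exact ((pvPmLe_upd _ _ _).mp this).1
      · rintro ⟨hpairs, hbel⟩
        constructor
        · intro c1 c2 h1 h2 h3 v hvmem w hw
          exact hpairs c1 c2 (by omega) h2 h3 v hvmem w hw
        · intro c2 h1 h2 w hw
          rw [pvPmLe_upd]
          refine ⟨hbel c2 (by omega) h2 w hw, ?_⟩
          intro v hvmem
          exact hpairs j c2 (by omega) (by omega) h2 v hvmem w hw

lemma pvAlt_iff (c : List (List Int)) :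
    mayores_a_la_derecha_alt c = true ↔ pvOrdered c := by
  have h := pvGoB_iff c 9 none (by omega)
  have h0 : (9:Int) - (9:Nat) = 0 := by norm_num
  rw [h0] at h
  unfold mayores_a_la_derecha_alt pvOrdered
  rw [h]
  constructor
  · exact fun ⟨h1, _⟩ => h1
  · intro h1
    refine ⟨h1, ?_⟩
    intro c2 _ _ w _ m hm; cases hm

lemma pvA_iff (c : List (List Int)) :
    mayores_a_la_derecha c = true ↔ pvOrdered c := by
  unfold mayores_a_la_derecha
  rw [Bool.not_eq_eq_eq_not, Bool.not_true, ← Bool.not_eq_true, List.any_eq_true]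
  constructor
  · -- no violation found by A  →  ordered
    intro hno
    intro c1 c2 h1 h2 h3 v hv w hw
    by_contra hlt
    rw [not_le] at hlt
    rcases (pvMem_nz (by omega)).mp hv with ⟨f1, hf1, hne1, hv1⟩
    rcases (pvMem_nz (by omega)).mp hw with ⟨f2, hf2, hne2, hw2⟩
    apply hno
    refine ⟨f1, PySem.List.mem_pyRange_one.mpr ⟨hf1.1, hf1.2⟩, ?_⟩
    rw [List.any_eq_true]
    refine ⟨c1, PySem.List.mem_pyRange_one.mpr ⟨h1, by omega⟩, ?_⟩
    rw [Bool.and_eq_true]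
    refine ⟨by simp [hne1], ?_⟩
    rw [List.any_eq_true]
    refine ⟨c2, PySem.List.mem_pyRange_one.mpr ⟨by omega, h3⟩, ?_⟩
    have hf2' : f2 = 0 ∨ f2 = 1 ∨ f2 = 2 := by omega
    have hwlt : pvCell c f2 c2 < pvCell c f1 c1 := by rw [hv1, hw2]; omega
    rcases hf2' with rfl | rfl | rfl
    · simp [hne2, hwlt]
    · simp [hne2, hwlt]
    · simp [hne2, hwlt]
  · -- ordered  →  no violation found by A
    intro hord hex
    rcases hex with ⟨f1, hf1, hrest⟩
    rw [List.any_eq_true] at hrest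
    rcases hrest with ⟨c1, hc1, hrest⟩
    rw [Bool.and_eq_true] at hrest
    rcases hrest with ⟨hne1, hrest⟩
    rw [List.any_eq_true] at hrest
    rcases hrest with ⟨c2, hc2, hrest⟩
    rw [PySem.List.mem_pyRange_one] at hf1 hc1 hc2
    have hne1' : pvCell c f1 c1 ≠ 0 := by simpa using hne1
    have hvmem : pvCell c f1 c1 ∈ pvNz c c1 :=
      (pvMem_nz hc1.1).mpr ⟨f1, ⟨hf1.1, hf1.2⟩, hne1', rfl⟩
    have hwof : ∀ f2 : Int, 0 ≤ f2 → f2 < 3 → pvCell c f2 c2 ≠ 0 →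
        pvCell c f2 c2 < pvCell c f1 c1 → False := by
      intro f2 hl hr hne2 hlt
      have hwmem : pvCell c f2 c2 ∈ pvNz c c2 :=
        (pvMem_nz (by omega)).mpr ⟨f2, ⟨hl, hr⟩, hne2, rfl⟩
      have := hord c1 c2 hc1.1 (by omega) hc2.2 _ hvmem _ hwmem
      omega
    simp only [Bool.or_eq_true, Bool.and_eq_true, bne_iff_ne, ne_eq, decide_eq_true_eq] at hrest
    rcases hrest with (⟨hne2, hlt⟩ | ⟨hne2, hlt⟩) | ⟨hne2, hlt⟩
    · exact hwof 0 (by omega) (by omega) hne2 hlt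
    · exact hwof 1 (by omega) (by omega) hne2 hlt
    · exact hwof 2 (by omega) (by omega) hne2 hlt

-- ===== VERDICT (by name: the statement is the Claim_ definition above) =====
theorem mayores_a_la_derecha_spec : Claim_equal_mayores_a_la_derecha := by
  intro c _ _
  unfold Spec_mayores_a_la_derecha
  rw [Bool.eq_iff_iff, pvA_iff, pvAlt_iff]
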